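-- pv_equiv track=rewrite | github.com/bohanc2/EEP_596A_CV | HW2/assignment2.py | box_filter
-- ===== SOURCE A (Python) =====
-- def box_filter(num_repetitions):
--     # Define box filter
--     box_filter = [1, 1, 1]
--     out = [1, 1, 1]
--
--     for _ in range(num_repetitions):
--         # Perform 1D conlve
--         out_new = [0] * (len(out) + len(box_filter) - 1)
--         for i in range(len(out)):
--             for j in range(len(box_filter)):
--                 out_new[i + j] += out[i] * box_filter[j]
--         out = out_new
--
--     return out
-- ===== SOURCE B (Python) =====
-- def box_filter(num_repetitions):
--     # The result is the coefficient row of (1 + x + x^2)**(num_repetitions + 1)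
--     # (trinomial coefficients), generated directly by the three-term recurrence
--     # (k+1)*a[k+1] = (n-k)*a[k] + (2n+1-k)*a[k-1], which follows from
--     # (1+x+x^2) * P'(x) = n * (1+2x) * P(x) for P = (1+x+x^2)^n.  O(n) steps,
--     # no convolution. range() ignores negative counts, hence the clamp to 0.
--     n = max(num_repetitions, 0) + 1
--     out = [1]
--     a_prev, a_cur = 0, 1
--     for k in range(2 * n):
--         a_next = ((n - k) * a_cur + (2 * n + 1 - k) * a_prev) // (k + 1)
--         out.append(a_next)
--         a_prev, a_cur = a_cur, a_next
--     return out
-- ===== Notes on version B (the rewrite author's own statement) =====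
-- stated objective: faster
-- what changed: B does no convolution at all: the result is the trinomial-coefficient row of (1+x+x^2)^(n+1), which B generates left-to-right in one pass via the three-term recurrence (k+1)a[k+1]=(n-k)a[k]+(2n+1-k)a[k-1] derived from the derivative identity, replacing A's n repeated O(n)-length convolutions.
import Mathlib
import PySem

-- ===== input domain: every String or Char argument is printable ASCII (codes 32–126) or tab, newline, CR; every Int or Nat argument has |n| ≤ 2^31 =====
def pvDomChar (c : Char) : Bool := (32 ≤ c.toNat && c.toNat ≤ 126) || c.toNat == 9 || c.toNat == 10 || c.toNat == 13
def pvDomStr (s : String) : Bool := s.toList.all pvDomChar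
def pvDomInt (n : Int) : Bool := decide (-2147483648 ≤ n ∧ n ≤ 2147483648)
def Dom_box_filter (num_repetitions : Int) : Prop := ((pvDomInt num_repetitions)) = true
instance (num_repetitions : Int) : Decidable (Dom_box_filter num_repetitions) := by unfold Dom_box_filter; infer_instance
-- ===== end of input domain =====

-- B generates the trinomial-coefficient row of (1+x+x^2)^(n+1) directly by a three-term
-- recurrence in one O(n) pass instead of A's n repeated convolutions; objective: faster.

-- ===== PORT A =====
-- literal port of A: all indexing (out[i], box[j], out_new[i+j]) is in range in Python,
-- so List.getD / List.set are exact here.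
def box_filter (num_repetitions : Int) : List Int :=
  let box : List Int := [1, 1, 1]
  (PySem.List.pyRange 0 num_repetitions 1).foldl
    (fun out _ =>
      (List.range out.length).foldl
        (fun acc i =>
          (List.range box.length).foldl
            (fun acc2 j => acc2.set (i + j) (acc2.getD (i + j) 0 + out.getD i 0 * box.getD j 0))
            acc)
        (List.replicate (out.length + box.length - 1) 0))
    [1, 1, 1]

-- ===== PORT B =====
-- literal port of Source B: state (out, a_prev, a_cur); Python's '//' is PySem.Int.floordiv.
def box_filter_alt (num_repetitions : Int) : List Int :=
  let n : Int := max num_repetitions 0 + 1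
  let st :=
    (PySem.List.pyRange 0 (2 * n) 1).foldl
      (fun (s : List Int × Int × Int) k =>
        let a_next := PySem.Int.floordiv ((n - k) * s.2.2 + (2 * n + 1 - k) * s.2.1) (k + 1)
        (s.1 ++ [a_next], s.2.2, a_next))
      ([1], 0, 1)
  st.1

-- ===== PRECONDITION & SPEC =====
def Spec_box_filter (num_repetitions : Int) (out : List Int) : Prop := out = box_filter_alt num_repetitions
instance (num_repetitions : Int) (out : List Int) : Decidable (Spec_box_filter num_repetitions out) := by unfold Spec_box_filter; infer_instance

-- ===== CLAIM (what is proved, stated in full; the proofs are below) =====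
def Claim_equal_box_filter : Prop := ∀ (num_repetitions : Int), Dom_box_filter num_repetitions → Spec_box_filter num_repetitions (box_filter num_repetitions)

-- ===== LEMMAS AND PROOFS =====

-- the trinomial coefficients: T n k = coefficient of x^k in (1+x+x^2)^n
def T : Nat → Int → Int
  | 0, k => if k = 0 then 1 else 0
  | n+1, k => T n k + T n (k-1) + T n (k-2)

lemma T_neg (n : Nat) : ∀ k : Int, k < 0 → T n k = 0 := by
  induction n with
  | zero => intro k hk; simp [T]; omega
  | succ n ih =>
    intro k hk
    simp [T, ih k hk, ih (k-1) (by omega), ih (k-2) (by omega)]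

lemma T_big (n : Nat) : ∀ k : Int, 2 * n < k → T n k = 0 := by
  induction n with
  | zero => intro k hk; simp [T]; omega
  | succ n ih =>
    intro k hk
    have h : (2 * n : Int) < k - 2 := by push_cast at hk ⊢; omega
    simp [T, ih k (by omega), ih (k-1) (by omega), ih (k-2) h]

lemma T_zero (n : Nat) : T n 0 = 1 := by
  induction n with
  | zero => simp [T]
  | succ n ih => simp [T, ih, T_neg n (-1) (by omega), T_neg n (-2) (by omega)]

-- derivative identity (1+x+x^2)·P' = n·(1+2x)·P on coefficients
lemma tri_identity (n : Nat) : ∀ k : Int,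
    (k + 1) * T n (k + 1) = ((n : Int) - k) * T n k + (2 * n + 1 - k) * T n (k - 1) := by
  induction n with
  | zero =>
    intro k
    simp only [T, Nat.cast_zero]
    split_ifs <;> omega
  | succ n ih =>
    intro k
    have h1 := ih k
    have h2 := ih (k - 1)
    have h3 := ih (k - 2)
    simp only [T] at *
    push_cast
    ring_nf at h1 h2 h3 ⊢
    linear_combination h1 + h2 + h3

-- the full coefficient row of (1+x+x^2)^n
def row (n : Nat) : List Int := (List.range (2 * n + 1)).map (fun (j : Nat) => T n (j : Int))

lemma length_row (n : Nat) : (row n).length = 2 * n + 1 := by simp [row]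

lemma getD_row (n : Nat) (j : Nat) : (row n).getD j 0 = T n (j : Int) := by
  by_cases h : j < 2 * n + 1
  · rw [row, List.getD_eq_getElem _ _ (by simpa using h)]
    simp only [List.getElem_map, List.getElem_range]
  · rw [List.getD_eq_default _ _ (by simpa [length_row] using h)]
    exact (T_big n j (by omega)).symm

-- ---- A's side: one convolution step sends row n to row (n+1) ----

-- A's one convolution step (body of A's outer loop)
def sA (out : List Int) : List Int :=
  let box : List Int := [1, 1, 1]
  (List.range out.length).foldl
    (fun acc i =>
      (List.range box.length).foldl
        (fun acc2 j => acc2.set (i + j) (acc2.getD (i + j) 0 + out.getD i 0 * box.getD j 0))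
        acc)
    (List.replicate (out.length + box.length - 1) 0)

-- add v at positions i, i+1, i+2 (unrolled inner j-loop)
def add3 (acc : List Int) (i : Nat) (v : Int) : List Int :=
  ((acc.set i (acc.getD i 0 + v)).set (i + 1)
      ((acc.set i (acc.getD i 0 + v)).getD (i + 1) 0 + v)).set (i + 2)
    (((acc.set i (acc.getD i 0 + v)).set (i + 1)
        ((acc.set i (acc.getD i 0 + v)).getD (i + 1) 0 + v)).getD (i + 2) 0 + v)

lemma length_add3 (acc : List Int) (i : Nat) (v : Int) : (add3 acc i v).length = acc.length := by
  simp [add3]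

lemma sA_eq_fold_add3 (out : List Int) :
    sA out = (List.range out.length).foldl
      (fun acc i => add3 acc i (out.getD i 0))
      (List.replicate (out.length + 2) 0) := by
  unfold sA
  have h3 : List.range 3 = [0, 1, 2] := by decide
  simp only [List.length_cons, List.length_nil, h3, List.foldl_cons, List.foldl_nil]
  congr 1
  funext acc i
  simp [add3, List.getD]

lemma getD_set0 (L : List Int) (p k : Nat) (v : Int) :
    (L.set p v).getD k 0 = if p = k ∧ p < L.length then v else L.getD k 0 := by
  by_cases hpk : p = k
  · subst hpk
    by_cases hp : p < L.length <;> simp [List.getD, hp]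
  · simp [List.getD, hpk]

lemma getD_add3 (acc : List Int) (i : Nat) (v : Int) (h : i + 2 < acc.length) (k : Nat) :
    (add3 acc i v).getD k 0 =
      acc.getD k 0 + (if k = i ∨ k = i + 1 ∨ k = i + 2 then v else 0) := by
  simp only [add3, getD_set0, List.length_set]
  split_ifs <;> (try omega) <;> (try simp) <;>
    exact congrArg (fun n => acc[n]?.getD 0) (by omega)

lemma length_foldA (out : List Int) (t : Nat) :
    ((List.range t).foldl (fun acc i => add3 acc i (out.getD i 0))
        (List.replicate (out.length + 2) 0)).length = out.length + 2 := by
  induction t with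
  | zero => simp
  | succ t ih =>
    rw [List.range_succ, List.foldl_append, List.foldl_cons, List.foldl_nil, length_add3]
    exact ih

lemma getD_foldA (out : List Int) (t : Nat) (ht : t ≤ out.length) (k : Nat) :
    ((List.range t).foldl (fun acc i => add3 acc i (out.getD i 0))
        (List.replicate (out.length + 2) 0)).getD k 0 =
      (if 2 ≤ k ∧ k - 2 < t then out.getD (k - 2) 0 else 0) +
      (if 1 ≤ k ∧ k - 1 < t then out.getD (k - 1) 0 else 0) +
      (if k < t then out.getD k 0 else 0) := by
  induction t with
  | zero =>
    simp only [List.range_zero, List.foldl_nil]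
    rw [if_neg (by omega), if_neg (by omega), if_neg (by omega)]
    simp [List.getD, List.getElem?_replicate]
    split <;> rfl
  | succ t ih =>
    have ht' : t ≤ out.length := by omega
    rw [List.range_succ, List.foldl_append, List.foldl_cons, List.foldl_nil]
    rw [getD_add3 _ _ _ (by rw [length_foldA]; omega) k, ih ht']
    by_cases h0 : k = t
    · subst h0
      rw [if_congr (show (2 ≤ k ∧ k - 2 < k) ↔ (2 ≤ k ∧ k - 2 < k + 1) by omega) rfl rfl,
        if_congr (show (1 ≤ k ∧ k - 1 < k) ↔ (1 ≤ k ∧ k - 1 < k + 1) by omega) rfl rfl,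
        if_neg (show ¬ k < k by omega), if_pos (show k < k + 1 by omega),
        if_pos (show k = k ∨ k = k + 1 ∨ k = k + 2 from Or.inl rfl)]
      ring
    · by_cases h1 : k = t + 1
      · subst h1
        rw [if_congr (show (2 ≤ t + 1 ∧ t + 1 - 2 < t) ↔ (2 ≤ t + 1 ∧ t + 1 - 2 < t + 1) by omega)
            rfl rfl,
          if_neg (show ¬ (1 ≤ t + 1 ∧ t + 1 - 1 < t) by omega),
          if_pos (show 1 ≤ t + 1 ∧ t + 1 - 1 < t + 1 by omega),
          if_neg (show ¬ t + 1 < t by omega), if_neg (show ¬ t + 1 < t + 1 by omega),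
          if_pos (show t + 1 = t ∨ t + 1 = t + 1 ∨ t + 1 = t + 2 from Or.inr (Or.inl rfl)),
          show t + 1 - 1 = t from by omega]
        ring
      · by_cases h2 : k = t + 2
        · subst h2
          rw [if_neg (show ¬ (2 ≤ t + 2 ∧ t + 2 - 2 < t) by omega),
            if_pos (show 2 ≤ t + 2 ∧ t + 2 - 2 < t + 1 by omega),
            if_congr (show (1 ≤ t + 2 ∧ t + 2 - 1 < t) ↔ (1 ≤ t + 2 ∧ t + 2 - 1 < t + 1) by omega)
              rfl rfl,
            if_neg (show ¬ t + 2 < t by omega), if_neg (show ¬ t + 2 < t + 1 by omega),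
            if_pos (show t + 2 = t ∨ t + 2 = t + 1 ∨ t + 2 = t + 2 from Or.inr (Or.inr rfl)),
            show t + 2 - 2 = t from by omega]
          ring
        · rw [if_congr (show (2 ≤ k ∧ k - 2 < t) ↔ (2 ≤ k ∧ k - 2 < t + 1) by omega) rfl rfl,
            if_congr (show (1 ≤ k ∧ k - 1 < t) ↔ (1 ≤ k ∧ k - 1 < t + 1) by omega) rfl rfl,
            if_congr (show (k < t) ↔ (k < t + 1) by omega) rfl rfl,
            if_neg (show ¬ (k = t ∨ k = t + 1 ∨ k = t + 2) by omega)]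
          ring

lemma sA_row (n : Nat) : sA (row n) = row (n + 1) := by
  have hlen : (sA (row n)).length = 2 * (n + 1) + 1 := by
    rw [sA_eq_fold_add3, length_foldA, length_row]; omega
  apply List.ext_getElem
  · rw [hlen, length_row]
  · intro k hk1 hk2
    have hk : k < 2 * n + 3 := by rw [hlen] at hk1; omega
    have l : (sA (row n))[k] = (sA (row n)).getD k 0 := by
      rw [List.getD_eq_getElem _ _ (by omega)]
    have r : (row (n+1))[k] = (row (n+1)).getD k 0 := by
      rw [List.getD_eq_getElem _ _ (by omega)]
    rw [l, r, getD_row, show sA (row n) = _ from sA_eq_fold_add3 (row n)]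
    rw [getD_foldA (row n) (row n).length le_rfl k]
    simp only [getD_row, length_row]
    have e2 : (if 2 ≤ k ∧ k - 2 < 2 * n + 1 then T n ((k - 2 : Nat) : Int) else 0)
        = T n ((k : Int) - 2) := by
      split_ifs with h
      · congr 1; omega
      · rcases Nat.lt_or_ge k 2 with h' | h'
        · exact (T_neg n _ (by omega)).symm
        · exact (T_big n _ (by omega)).symm
    have e1 : (if 1 ≤ k ∧ k - 1 < 2 * n + 1 then T n ((k - 1 : Nat) : Int) else 0)
        = T n ((k : Int) - 1) := by
      split_ifs with h
      · congr 1; omega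
      · rcases Nat.lt_or_ge k 1 with h' | h'
        · exact (T_neg n _ (by omega)).symm
        · exact (T_big n _ (by omega)).symm
    have e0 : (if k < 2 * n + 1 then T n (k : Int) else 0) = T n (k : Int) := by
      split_ifs with h
      · rfl
      · exact (T_big n _ (by omega)).symm
    rw [e2, e1, e0]
    simp only [T]
    ring
  -- row 1 is A's starting list [1,1,1]
lemma row_one : row 1 = [1, 1, 1] := by decide

lemma foldl_sA (l : List Int) : ∀ n : Nat,
    l.foldl (fun o _ => sA o) (row n) = row (n + l.length) := by
  induction l with
  | nil => intro n; simp
  | cons x xs ih =>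
    intro n
    rw [List.foldl_cons, sA_row n, ih (n + 1)]
    congr 1
    simp
    omega

lemma box_filter_eq_row (r : Int) : box_filter r = row (1 + r.toNat) := by
  show (PySem.List.pyRange 0 r 1).foldl (fun out _ => sA out) [1,1,1] = row (1 + r.toNat)
  rw [← row_one, foldl_sA _ 1, PySem.List.length_pyRange_one,
    show (r - 0).toNat = r.toNat from by omega]

-- ---- B's side: the recurrence loop builds the same row ----

-- B's loop body (N = n in Source B)
def stepB (N : Int) (s : List Int × Int × Int) (k : Int) : List Int × Int × Int :=
  let a_next := PySem.Int.floordiv ((N - k) * s.2.2 + (2 * N + 1 - k) * s.2.1) (k + 1)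
  (s.1 ++ [a_next], s.2.2, a_next)

lemma stepB_at (n j : Nat) :
    stepB (n : Int)
        ((List.range (j + 1)).map (fun (i : Nat) => T n (i : Int)), T n ((j : Int) - 1), T n (j : Int))
        ((j : Nat) : Int) =
      ((List.range (j + 2)).map (fun (i : Nat) => T n (i : Int)), T n (j : Int), T n ((j : Int) + 1)) := by
  have hnum : ((n : Int) - (j : Int)) * T n (j : Int) + (2 * n + 1 - (j : Int)) * T n ((j : Int) - 1)
      = ((j : Int) + 1) * T n ((j : Int) + 1) := (tri_identity n (j : Int)).symm
  have hdiv : PySem.Int.floordiv (((j : Int) + 1) * T n ((j : Int) + 1)) ((j : Int) + 1)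
      = T n ((j : Int) + 1) := by
    rw [PySem.Int.floordiv_eq_ediv_of_pos (by omega)]
    exact Int.mul_ediv_cancel_left _ (by omega)
  simp only [stepB, hnum, hdiv]
  simp [List.range_succ]

lemma B_inv (n : Nat) (j : Nat) :
    (((List.range j).map (fun (k : Nat) => (k : Int))).foldl (stepB (n : Int)) ([1], 0, 1))
      = ((List.range (j + 1)).map (fun (i : Nat) => T n (i : Int)), T n ((j : Int) - 1), T n (j : Int)) := by
  induction j with
  | zero =>
    simp [T_zero n, T_neg n (-1) (by omega), List.range_succ]
  | succ j ih =>
    rw [List.range_succ, List.map_append, List.foldl_append, ih]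
    simp only [List.map_cons, List.map_nil, List.foldl_cons, List.foldl_nil]
    rw [stepB_at n j]
    have h2 : T n ((j : Int)) = T n (((j + 1 : Nat) : Int) - 1) := by congr 1; omega
    have h3 : T n ((j : Int) + 1) = T n ((j + 1 : Nat) : Int) := by congr 1
    rw [h2, h3]

lemma box_filter_alt_eq_row (r : Int) : box_filter_alt r = row (r.toNat + 1) := by
  have hNt : ((max r 0 + 1).toNat : Int) = max r 0 + 1 := Int.toNat_of_nonneg (by omega)
  set n' : Nat := (max r 0 + 1).toNat with hn'
  have hrange : PySem.List.pyRange 0 (2 * (max r 0 + 1)) 1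
      = (List.range (2 * n')).map (fun (k : Nat) => (k : Int)) := by
    rw [PySem.List.pyRange_one]
    have : (2 * (max r 0 + 1) - 0).toNat = 2 * n' := by omega
    rw [this]
    exact List.map_congr_left (fun k _ => by omega)
  show ((PySem.List.pyRange 0 (2 * (max r 0 + 1)) 1).foldl
      (fun (s : List Int × Int × Int) k =>
        ((s.1 ++ [PySem.Int.floordiv (((max r 0 + 1) - k) * s.2.2 + (2 * (max r 0 + 1) + 1 - k) * s.2.1) (k + 1)]), s.2.2,
          PySem.Int.floordiv (((max r 0 + 1) - k) * s.2.2 + (2 * (max r 0 + 1) + 1 - k) * s.2.1) (k + 1)))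
      ([1], 0, 1)).1 = row (r.toNat + 1)
  have hstep : (fun (s : List Int × Int × Int) (k : Int) =>
      ((s.1 ++ [PySem.Int.floordiv (((max r 0 + 1) - k) * s.2.2 + (2 * (max r 0 + 1) + 1 - k) * s.2.1) (k + 1)]), s.2.2,
        PySem.Int.floordiv (((max r 0 + 1) - k) * s.2.2 + (2 * (max r 0 + 1) + 1 - k) * s.2.1) (k + 1)))
      = stepB ((n' : Int)) := by
    rw [hNt]
    rfl
  rw [hrange, hstep, B_inv n' (2 * n')]
  have hn'' : n' = r.toNat + 1 := by omega
  rw [row, hn'']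

-- ===== VERDICT (by name: the statement is the Claim_ definition above) =====
theorem box_filter_spec : Claim_equal_box_filter := by
  intro r _
  unfold Spec_box_filter
  rw [box_filter_eq_row, box_filter_alt_eq_row]
  congr 1
  omega
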